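-- pv_equiv track=rewrite | github.com/FrnkMrz/pcap2llm | src/pcap2llm/summarizer.py | _classify_anomalies
-- ===== SOURCE A (Python) =====
-- def _classify_anomalies(anomalies: list[str]) -> dict[str, int]:
--     """Count anomalies by layer tag (e.g. 'transport', 'diameter', 'gtpv2')."""
--     counts: dict[str, int] = {}
--     for entry in anomalies:
--         if entry.startswith("[") and "]" in entry:
--             layer = entry[1:entry.index("]")]
--             counts[layer] = counts.get(layer, 0) + 1
--         else:
--             counts.setdefault("transport", 0)
--             counts["transport"] += 1
--     return counts
-- ===== SOURCE B (Python) =====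
-- def _tag(entry):
--     if entry.startswith("[") and "]" in entry:
--         return entry[1:entry.find("]")]
--     return "transport"
--
--
-- def _classify_anomalies(anomalies: list[str]) -> dict[str, int]:
--     """Count anomalies by layer tag (e.g. 'transport', 'diameter', 'gtpv2')."""
--     counts: dict[str, int] = {}
--     tags = [_tag(e) for e in anomalies]
--     while tags:
--         t = tags[0]
--         rest = [x for x in tags[1:] if x != t]
--         counts[t] = len(tags) - len(rest)
--         tags = rest
--     return counts
-- ===== Notes on version B (the rewrite author's own statement) =====
-- stated objective: alternative
-- what changed: Replaces A's single-pass incremental dict tally with a count-and-remove partition loop: repeatedly take the first remaining tag, filter out all its occurrences, and record its count as the length difference, so no per-element dict lookup/increment happens at all.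
import Mathlib
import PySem

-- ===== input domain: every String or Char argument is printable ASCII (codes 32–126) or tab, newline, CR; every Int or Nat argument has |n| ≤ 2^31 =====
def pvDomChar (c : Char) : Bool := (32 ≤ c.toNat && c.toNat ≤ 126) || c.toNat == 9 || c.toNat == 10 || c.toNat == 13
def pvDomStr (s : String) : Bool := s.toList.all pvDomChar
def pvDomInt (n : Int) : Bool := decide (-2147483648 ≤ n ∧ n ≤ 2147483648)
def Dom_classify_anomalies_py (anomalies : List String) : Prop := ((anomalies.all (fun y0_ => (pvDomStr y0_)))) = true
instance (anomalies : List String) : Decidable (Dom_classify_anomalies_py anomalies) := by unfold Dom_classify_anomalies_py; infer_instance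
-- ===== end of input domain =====

-- B replaces A's per-entry hash tally with a count-and-remove partition loop: repeatedly
-- take the first remaining tag, filter out all its occurrences, and record the count as a
-- length difference; objective: alternative algorithm, no dict lookups during counting.

-- ===== PORT A =====
-- entry.index("]") is ported as Str.find: under the guard '"]" in entry' they agree
-- (index raises only when absent, which the guard excludes).
def classify_anomalies_py (anomalies : List String) : List (String × Int) :=
  (anomalies.foldl (fun counts entry =>
      if PySem.Str.startswith entry "[" && PySem.Str.isIn "]" entry then
        let layer := PySem.Str.slice entry (some 1) (some (PySem.Str.find entry "]"))
        counts.insert layer (counts.getD layer 0 + 1)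
      else
        let c1 := counts.setdefault "transport" (0 : Int)
        c1.insert "transport" (c1.getD "transport" 0 + 1))
    PySem.Dict.empty).items

-- ===== PORT B =====
def pvTag (entry : String) : String :=
  if PySem.Str.startswith entry "[" && PySem.Str.isIn "]" entry then
    PySem.Str.slice entry (some 1) (some (PySem.Str.find entry "]"))
  else "transport"

-- the 'while tags:' loop of Source B: state = (remaining tags, counts dict)
def pvGo : List String → PySem.Dict String Int → PySem.Dict String Int
  | [], counts => counts
  | t :: r0, counts =>
    let rest := r0.filter (fun x => x ≠ t)
    pvGo rest (counts.insert t (((r0.length : Int) + 1) - (rest.length : Int)))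
termination_by tags _ => tags.length
decreasing_by
  simp only [List.length_unattach, List.length_cons]
  exact Nat.lt_succ_of_le (le_trans (List.length_filter_le _ _) (by simp))

def classify_anomalies_py_alt (anomalies : List String) : List (String × Int) :=
  (pvGo (anomalies.map pvTag) PySem.Dict.empty).items

-- ===== PRECONDITION & SPEC =====
def Spec_classify_anomalies_py (anomalies : List String) (out : List (String × Int)) : Prop := out = classify_anomalies_py_alt anomalies
instance (anomalies : List String) (out : List (String × Int)) : Decidable (Spec_classify_anomalies_py anomalies out) := by unfold Spec_classify_anomalies_py; infer_instance

-- ===== CLAIM (what is proved, stated in full; the proofs are below) =====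
def Claim_equal_classify_anomalies_py : Prop := ∀ (anomalies : List String), Dom_classify_anomalies_py anomalies → Spec_classify_anomalies_py anomalies (classify_anomalies_py anomalies)

-- ===== LEMMAS AND PROOFS =====

-- each iteration of A's loop is exactly 'counts[tag(entry)] = counts.get(tag(entry), 0) + 1'
theorem pv_step_eq (d : PySem.Dict String Int) (entry : String) :
    (if PySem.Str.startswith entry "[" && PySem.Str.isIn "]" entry then
        let layer := PySem.Str.slice entry (some 1) (some (PySem.Str.find entry "]"))
        d.insert layer (d.getD layer 0 + 1)
      else
        let c1 := d.setdefault "transport" (0 : Int)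
        c1.insert "transport" (c1.getD "transport" 0 + 1))
    = d.modify (pvTag entry) 0 (· + 1) := by
  unfold pvTag
  split_ifs with h
  · rfl
  · by_cases hc : d.contains "transport"
    · simp [PySem.Dict.setdefault_of_contains d _ hc, PySem.Dict.modify]
    · rw [PySem.Dict.setdefault_of_not_contains d _ (by simpa using hc)]
      have hn : d.get? "transport" = none :=
        (PySem.Dict.get?_eq_none_iff_contains d _).mpr (by simpa using hc)
      simp [PySem.Dict.insert_insert_self, PySem.Dict.modify,
        PySem.Dict.getD, hn]

-- first-occurrence dedup commutes with filter
theorem pv_ofList_filter (p : String → Bool) (xs : List String) :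
    PySem.Set.ofList (xs.filter p) = (PySem.Set.ofList xs).filter p := by
  induction xs with
  | nil => rfl
  | cons x xs ih =>
    by_cases h : p x
    · rw [List.filter_cons_of_pos h, PySem.Set.ofList_cons, PySem.Set.ofList_cons,
        List.filter_cons_of_pos h]
      simp [PySem.Set.discard, List.filter_filter, ih, Bool.and_comm]
    · rw [List.filter_cons_of_neg (by simpa using h), PySem.Set.ofList_cons, ih,
        List.filter_cons_of_neg (by simpa using h)]
      simp only [PySem.Set.discard, List.filter_filter]
      refine List.filter_congr ?_
      intro a _
      cases hpa : p a
      · simp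
      · have hax : ¬ (a == x) = true := by
          intro hb
          exact h (by rwa [(eq_of_beq hb)] at hpa)
        simp [hax]

-- count of the head tag: occurrences = length removed by the filter, plus the head
theorem pv_count_len (r0 : List String) (t : String) :
    r0.count t + (r0.filter (fun x => x ≠ t)).length = r0.length := by
  induction r0 with
  | nil => rfl
  | cons x xs ih =>
    simp only [ne_eq, decide_not] at *
    by_cases h : x = t
    · subst h; simp; omega
    · rw [List.filter_cons_of_pos (by simpa using h)]
      simp [h]; omega

-- counts of other tags survive the filter
theorem pv_count_filter (u t : String) (r0 : List String) (h : u ≠ t) :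
    (r0.filter (fun x => x ≠ t)).count u = r0.count u := by
  induction r0 with
  | nil => rfl
  | cons x xs ih =>
    simp only [ne_eq, decide_not] at *
    by_cases hx : x = t
    · subst hx; rw [List.filter_cons_of_neg (by simp)]
      simp [(show ¬ x = u from fun hh => h hh.symm), ih]
    · rw [List.filter_cons_of_pos (by simpa using hx)]
      simp [List.count_cons, ih]

-- one unfolding of the loop, named so the proof can rewrite with it
theorem pv_go_cons (t : String) (r0 : List String) (d : PySem.Dict String Int) :
    pvGo (t :: r0) d
      = pvGo (r0.filter (fun x => x ≠ t))
          (d.insert t (((r0.length : Int) + 1) - ((r0.filter (fun x => x ≠ t)).length : Int))) := by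
  conv_lhs => rw [pvGo]

-- B's loop materialises Counter(tags).items(), provided no pending tag is a key yet
theorem pv_go_items (n : Nat) : ∀ (tags : List String) (d : PySem.Dict String Int),
    tags.length ≤ n → (∀ u ∈ tags, d.contains u = false) →
    (pvGo tags d).items
      = d.items ++ (PySem.Set.ofList tags).map (fun u => (u, (tags.count u : Int))) := by
  induction n with
  | zero =>
    intro tags d hlen _
    have : tags = [] := List.eq_nil_of_length_eq_zero (Nat.le_zero.mp hlen)
    subst this
    simp [pvGo, PySem.Set.ofList]
  | succ n ih =>
    intro tags d hlen hfresh
    cases tags with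
    | nil => simp [pvGo, PySem.Set.ofList]
    | cons t r0 =>
      rw [pv_go_cons]
      set rest := r0.filter (fun x => x ≠ t) with hrest
      have htfresh : d.contains t = false := hfresh t (by simp)
      set d' := d.insert t (((r0.length : Int) + 1) - (rest.length : Int)) with hd'
      have hrlen : rest.length ≤ n := by
        have h1 : rest.length ≤ r0.length := List.length_filter_le _ _
        have h2 : r0.length + 1 ≤ n + 1 := by simpa using hlen
        omega
      have hfresh' : ∀ u ∈ rest, d'.contains u = false := by
        intro u hu
        have hune : ¬ (u = t) := by
          have := List.of_mem_filter hu
          simpa using this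
        have hur0 : u ∈ r0 := List.mem_of_mem_filter hu
        rw [hd', PySem.Dict.contains_eq_isSome_get?,
          PySem.Dict.get?_insert_of_ne d _ hune,
          ← PySem.Dict.contains_eq_isSome_get?]
        exact hfresh u (by simp [hur0])
      rw [ih rest d' hrlen hfresh']
      rw [hd', PySem.Dict.items_insert_of_not_contains d _ htfresh]
      rw [List.append_assoc]
      congr 1
      -- heads and tails of the dedup list
      have hofl : PySem.Set.ofList (t :: r0)
          = t :: PySem.Set.ofList rest := by
        rw [PySem.Set.ofList_cons, hrest]
        have : (r0.filter (fun x => x ≠ t)) = r0.filter (fun y => !(y == t)) := by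
          apply List.filter_congr
          intro a _
          simp only [ne_eq, decide_not]
          rw [Bool.beq_eq_decide_eq]
        rw [this, pv_ofList_filter]
        rfl
      rw [hofl, List.map_cons]
      simp only [List.singleton_append, List.cons.injEq]
      constructor
      · -- head entry: the count of t as a length difference
        have hc := pv_count_len r0 t
        have : ((t :: r0).count t : Int) = ((r0.length : Int) + 1) - (rest.length : Int) := by
          rw [List.count_cons_self, hrest]
          push_cast
          omega
        rw [this]
      · -- remaining entries: counts unchanged by dropping t's occurrences
        apply List.map_eq_map_iff.mpr
        intro u hu
        have hune : u ≠ t := by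
          have hmem : u ∈ rest := (PySem.Set.mem_ofList _ _).mp hu
          have := List.of_mem_filter hmem
          simpa using this
        have h2 : (t :: r0).count u = rest.count u := by
          rw [hrest, pv_count_filter u t r0 hune]
          simp [(show ¬ t = u from fun hh => hune hh.symm)]
        rw [h2]

theorem classify_anomalies_py_eq_alt (anomalies : List String) :
    classify_anomalies_py anomalies = classify_anomalies_py_alt anomalies := by
  unfold classify_anomalies_py classify_anomalies_py_alt
  have h1 : (anomalies.foldl (fun counts entry =>
      if PySem.Str.startswith entry "[" && PySem.Str.isIn "]" entry then
        let layer := PySem.Str.slice entry (some 1) (some (PySem.Str.find entry "]"))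
        counts.insert layer (counts.getD layer 0 + 1)
      else
        let c1 := counts.setdefault "transport" (0 : Int)
        c1.insert "transport" (c1.getD "transport" 0 + 1))
      PySem.Dict.empty)
      = PySem.Dict.counter (anomalies.map pvTag) := by
    rw [PySem.Dict.counter_eq_foldl, List.foldl_map]
    apply PySem.List.foldl_congr_mem
    intro d e _
    exact pv_step_eq d e
  rw [h1, PySem.Dict.items_counter,
    pv_go_items (anomalies.map pvTag).length (anomalies.map pvTag) PySem.Dict.empty
      (le_refl _) (fun u _ => by simp [PySem.Dict.contains_empty])]
  simp [PySem.Dict.empty]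

-- ===== VERDICT (by name: the statement is the Claim_ definition above) =====
theorem classify_anomalies_py_spec : Claim_equal_classify_anomalies_py := by
  intro anomalies _
  exact classify_anomalies_py_eq_alt anomalies
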